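-- pv_equiv track=rewrite | github.com/shg9411/algo | coding_py/pro62049.py | solution
-- ===== SOURCE A (Python) =====
-- def solution(n):
--     answer = []
--     for _ in range(n):
--         answer.append(0)
--         for num in answer[-2::-1]:
--             if num==0:
--                 answer.append(1)
--             else:
--                 answer.append(0)
--     return answer
-- ===== SOURCE B (Python) =====
-- def solution(n):
--     if n <= 0:
--         return []
--     answer = []
--     for i in range(1, 2 ** n):
--         j = i
--         while j % 2 == 0:
--             j //= 2
--         answer.append(0 if j % 4 == 1 else 1)
--     return answer
-- ===== Notes on version B (the rewrite author's own statement) =====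
-- stated objective: alternative
-- what changed: B computes each element directly from its one-based index (strip trailing factors of two, then test the odd part's residue mod four) instead of A's iterative doubling that appends the complemented reverse of the prefix.
import Mathlib
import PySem

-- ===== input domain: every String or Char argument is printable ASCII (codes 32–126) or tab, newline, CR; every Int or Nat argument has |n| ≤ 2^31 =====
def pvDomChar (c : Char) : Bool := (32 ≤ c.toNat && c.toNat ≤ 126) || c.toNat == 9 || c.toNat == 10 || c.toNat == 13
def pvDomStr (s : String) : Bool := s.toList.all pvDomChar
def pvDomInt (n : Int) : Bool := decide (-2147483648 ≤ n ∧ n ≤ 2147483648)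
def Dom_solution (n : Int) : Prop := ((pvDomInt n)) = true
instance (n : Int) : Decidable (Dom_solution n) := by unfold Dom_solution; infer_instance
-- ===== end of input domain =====

-- B builds the same 0/1 sequence by a per-index odd-part formula instead of A's
-- reverse-and-complement doubling (objective: alternative algorithm).

-- ===== PORT A =====
def solution (n : Int) : List Int :=
  (PySem.List.pyRange 0 n 1).foldl
    (fun answer _ =>
      -- answer.append(0), then for num in answer[-2::-1]: append 1 if num==0 else 0
      match PySem.List.slice? (answer ++ [0]) (some (-2)) none (-1) with
      | some l =>
        l.foldl (fun acc num => if num == 0 then acc ++ [1] else acc ++ [0]) (answer ++ [0])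
      | none => answer ++ [0])   -- unreachable: slice? with step -1 never fails
    []

-- ===== PORT B =====
-- while j % 2 == 0: j //= 2 ; in B, j starts at an i ≥ 1, so the '0 < j' conjunct is a
-- termination guard only, never reached with a different value than Python computes
def oddPart (j : Int) : Int :=
  if h : PySem.Int.mod j 2 = 0 ∧ 0 < j then oddPart (PySem.Int.floordiv j 2) else j
  termination_by j.toNat
  decreasing_by
    have h2 : (2:Int) ∣ j := (PySem.Int.mod_eq_zero_iff_dvd j 2).mp h.1
    obtain ⟨k, hk⟩ := h2
    have : PySem.Int.floordiv j 2 = k := by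
      rw [PySem.Int.floordiv_eq_ediv_of_pos (by omega), hk]
      exact Int.mul_ediv_cancel_left k (by omega)
    rw [this]; omega

def solution_alt (n : Int) : List Int :=
  if n ≤ 0 then []
  else
    (PySem.List.pyRange 1 ((2:Int) ^ n.toNat) 1).foldl
      (fun answer i =>
        answer ++ [if PySem.Int.mod (oddPart i) 4 = 1 then (0:Int) else 1])
      []

-- ===== PRECONDITION & SPEC =====
def Spec_solution (n : Int) (out : List Int) : Prop := out = solution_alt n
instance (n : Int) (out : List Int) : Decidable (Spec_solution n out) := by unfold Spec_solution; infer_instance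

-- ===== CLAIM (what is proved, stated in full; the proofs are below) =====
def Claim_equal_solution : Prop := ∀ (n : Int), Dom_solution n → Spec_solution n (solution n)

-- ===== LEMMAS AND PROOFS =====

def flipI (x : Int) : Int := if x = 0 then 1 else 0

def dragonStep (a : List Int) : List Int := a ++ [0] ++ a.reverse.map flipI

def dragon : Nat → List Int
  | 0 => []
  | n + 1 => dragonStep (dragon n)

def gN (i : Nat) : Int := if PySem.Int.mod (oddPart (i : Int)) 4 = 1 then 0 else 1

def BL (k : Nat) : List Int := (List.range (2 ^ k - 1)).map (fun j => gN (j + 1))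

-- answer[-2::-1] is the reverse of the list without its last element
theorem slice_rev (xs : List Int) :
    PySem.List.slice? xs (some (-2)) none (-1) = some xs.dropLast.reverse := by
  simp only [PySem.List.slice?, PySem.List.sliceIndices]
  norm_num
  by_cases h2 : 2 ≤ xs.length
  · rw [if_pos (by omega), max_eq_left (by omega : (-1:Int) ≤ -2 + xs.length)]
    have hc : ((-2 + (xs.length:Int)) + 1).toNat = xs.length - 1 := by omega
    rw [hc]
    rw [List.filterMap_congr (g := fun x => (some ∘ fun x => xs.getD (xs.length - 2 - x) 0) x) ?_]
    · rw [List.filterMap_eq_map]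
      apply List.ext_getElem
      · simp
      · intro i hi1 hi2
        have hL : xs.dropLast.length = xs.length - 1 := List.length_dropLast
        have hi : i < xs.length - 1 := by simpa using hi1
        simp only [List.getElem_map, List.getElem_range, List.getElem_reverse,
          List.getElem_dropLast]
        rw [List.getD_eq_getElem _ _ (by omega)]
        congr 1
        omega
    · intro x hx
      simp only [List.mem_range] at hx
      have hidx : ((-2 + (xs.length:Int)) + -(x:Int)).toNat = xs.length - 2 - x := by omega
      rw [hidx, List.getElem?_eq_getElem (by omega)]
      simp only [Function.comp]
      rw [List.getD_eq_getElem _ _ (by omega)]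
  · rw [if_neg (by omega)]
    interval_cases h : xs.length
    · simp [List.eq_nil_of_length_eq_zero h]
    · rcases xs with _ | ⟨a, _ | _⟩ <;> simp_all

-- one iteration of A's outer loop is the dragon doubling step
theorem step_eq (a : List Int) :
    (match PySem.List.slice? (a ++ ([0]:List Int)) (some (-2)) none (-1) with
     | some l => l.foldl (fun acc num => if num == 0 then acc ++ [1] else acc ++ [0]) (a ++ ([0]:List Int))
     | none => a ++ ([0]:List Int)) = dragonStep a := by
  rw [slice_rev (a ++ [0]), List.dropLast_concat]
  show a.reverse.foldl _ (a ++ ([0]:List Int)) = dragonStep a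
  rw [PySem.List.foldl_congr_mem (l := a.reverse) (init := a ++ ([0]:List Int))
    (f := fun acc num => if num == 0 then acc ++ [1] else acc ++ [0])
    (g := fun acc num => acc ++ [flipI num])
    (fun acc x _ => by by_cases hx : x = 0 <;> simp [hx, flipI])]
  rw [PySem.List.foldl_append_singleton_eq_map]
  simp [dragonStep]

theorem foldl_iterate (l : List Int) (init : List Int) (g : List Int → List Int) :
    l.foldl (fun a _ => g a) init = g^[l.length] init := by
  induction l generalizing init with
  | nil => rfl
  | cons x t ih => simp [List.foldl_cons, ih, Function.iterate_succ_apply]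

theorem iterate_dragon (k : Nat) : dragonStep^[k] [] = dragon k := by
  induction k with
  | zero => rfl
  | succ k ih => rw [Function.iterate_succ_apply', ih]; rfl

theorem solution_eq_dragon (n : Int) : solution n = dragon n.toNat := by
  unfold solution
  rw [PySem.List.foldl_congr_mem (l := PySem.List.pyRange 0 n 1) (init := ([]:List Int))
    (f := fun (answer : List Int) (_ : Int) =>
      match PySem.List.slice? (answer ++ [0]) (some (-2)) none (-1) with
      | some l =>
        l.foldl (fun acc num => if num == 0 then acc ++ [1] else acc ++ [0]) (answer ++ [0])
      | none => answer ++ [0])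
    (g := fun a _ => dragonStep a)
    (fun acc x _ => step_eq acc)]
  rw [foldl_iterate, PySem.List.length_pyRange_one]
  simpa using iterate_dragon n.toNat

theorem oddPart_of_odd (j : Int) (h : PySem.Int.mod j 2 ≠ 0) : oddPart j = j := by
  rw [oddPart, dif_neg]
  exact fun hc => h hc.1

theorem oddPart_double (j : Int) (h : 0 < j) : oddPart (2 * j) = oddPart j := by
  rw [oddPart, dif_pos ⟨(PySem.Int.mod_eq_zero_iff_dvd _ 2).mpr ⟨j, rfl⟩, by omega⟩]
  congr 1
  rw [PySem.Int.floordiv_eq_ediv_of_pos (by omega)]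
  exact Int.mul_ediv_cancel_left j (by omega)

theorem oddPart_two_pow (k : Nat) : oddPart ((2:Int) ^ k) = 1 := by
  induction k with
  | zero => exact oddPart_of_odd 1 (by decide)
  | succ k ih => rw [pow_succ, mul_comm, oddPart_double _ (by positivity), ih]

theorem gN_two_mul (x : Nat) (h : x ≠ 0) : gN (2 * x) = gN x := by
  unfold gN
  have : ((2 * x : Nat) : Int) = 2 * (x : Int) := by push_cast; ring
  rw [this, oddPart_double _ (by omega)]

theorem gN_odd (i : Nat) (h : i % 2 = 1) : gN i = if i % 4 = 1 then 0 else 1 := by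
  unfold gN
  have h2 : PySem.Int.mod (i:Int) 2 = ((i % 2 : Nat) : Int) := by
    exact_mod_cast PySem.Int.mod_natCast i 2
  have h4 : PySem.Int.mod (i:Int) 4 = ((i % 4 : Nat) : Int) := by
    exact_mod_cast PySem.Int.mod_natCast i 4
  rw [oddPart_of_odd _ (by rw [h2, h]; decide), h4]
  by_cases hc : i % 4 = 1 <;> simp [hc]
  omega

theorem gN_two_pow (k : Nat) : gN (2 ^ k) = 0 := by
  unfold gN
  have : ((2 ^ k : Nat) : Int) = (2:Int) ^ k := by push_cast; ring
  rw [this, oddPart_two_pow]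
  decide

-- the second half of a dragon block is the complemented mirror of the first half
theorem mirror (n : Nat) : ∀ m, 1 ≤ n → 1 ≤ m → m < 2 ^ n →
    gN (2 ^ n + m) = flipI (gN (2 ^ n - m)) := by
  induction n with
  | zero => omega
  | succ n ih =>
    intro m _ hm hlt
    by_cases hn0 : n = 0
    · subst hn0
      have : m = 1 := by omega
      subst this
      rw [show 2 ^ 1 + 1 = 3 from rfl, show 2 ^ 1 - 1 = 1 from rfl,
        gN_odd 3 (by norm_num), gN_odd 1 (by norm_num)]
      norm_num [flipI]
    · have hn1 : 1 ≤ n := by omega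
      have hp : 2 ^ (n + 1) = 2 * 2 ^ n := by ring
      by_cases he : m % 2 = 0
      · obtain ⟨m', rfl⟩ : ∃ m', m = 2 * m' := ⟨m / 2, by omega⟩
        have hm' : 1 ≤ m' := by omega
        have hlt' : m' < 2 ^ n := by omega
        rw [show 2 ^ (n + 1) + 2 * m' = 2 * (2 ^ n + m') by omega,
          show 2 ^ (n + 1) - 2 * m' = 2 * (2 ^ n - m') by omega,
          gN_two_mul _ (by omega), gN_two_mul _ (by omega)]
        exact ih m' hn1 hm' hlt'
      · have ho : m % 2 = 1 := by omega
        have h4 : 2 ^ (n + 1) % 4 = 0 := by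
          have : 2 ^ (n + 1) = 4 * 2 ^ (n - 1) := by
            rw [show n + 1 = 2 + (n - 1) by omega, pow_add]; norm_num
          omega
        rw [gN_odd _ (by omega), gN_odd _ (by omega)]
        obtain h1 | h3 : m % 4 = 1 ∨ m % 4 = 3 := by omega
        · rw [if_pos (by omega), if_neg (by omega)]; rfl
        · rw [if_neg (by omega), if_pos (by omega)]; rfl

theorem dragon_eq_BL (k : Nat) : dragon k = BL k := by
  induction k with
  | zero => rfl
  | succ k ih =>
    have h1 : (1:Nat) ≤ 2 ^ k := Nat.one_le_two_pow
    show dragonStep (dragon k) = BL (k + 1)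
    rw [ih]
    unfold dragonStep BL
    rw [show 2 ^ (k + 1) - 1 = (2 ^ k - 1 + 1) + (2 ^ k - 1) by
        have h2 := Nat.one_le_two_pow (n := k + 1); rw [pow_succ]; omega,
      List.range_add, List.range_succ]
    simp only [List.map_append, List.map_map, List.map_cons, List.map_nil]
    rw [show 2 ^ k - 1 + 1 = 2 ^ k by omega, gN_two_pow]
    congr 1
    apply List.ext_getElem
    · simp
    · intro i hi1 hi2
      have hL : (BL k).length = 2 ^ k - 1 := by simp [BL]
      have hiR : i < 2 ^ k - 1 := by
        simpa [List.length_map, List.length_reverse, hL] using hi1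
      have hk1 : 1 ≤ k := by
        rcases Nat.eq_zero_or_pos k with h | h
        · subst h; simp at hiR
        · exact h
      simp only [List.getElem_map, List.getElem_reverse, List.length_map,
        List.length_reverse, hL, BL, List.getElem_range, List.length_range,
        Function.comp_apply]
      rw [show 2 ^ k - 1 - 1 - i + 1 = 2 ^ k - (i + 1) by omega,
        show 2 ^ k + i + 1 = 2 ^ k + (i + 1) by omega,
        mirror k (i + 1) hk1 (by omega) (by omega)]

theorem solution_alt_eq_BL (n : Int) : solution_alt n = BL n.toNat := by
  unfold solution_alt
  by_cases hn : n ≤ 0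
  · rw [if_pos hn]
    have : n.toNat = 0 := by omega
    rw [this]; rfl
  · rw [if_neg hn]
    rw [PySem.List.foldl_append_singleton_eq_map
      (f := fun i => if PySem.Int.mod (oddPart i) 4 = 1 then (0:Int) else 1)]
    rw [PySem.List.pyRange_one, List.map_map]
    have hc : ((2:Int) ^ n.toNat - 1).toNat = 2 ^ n.toNat - 1 := by
      have : ((2:Int) ^ n.toNat) = ((2 ^ n.toNat : Nat) : Int) := by push_cast; ring
      rw [this]
      have := Nat.one_le_two_pow (n := n.toNat)
      omega
    rw [hc]
    unfold BL
    rw [List.nil_append]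
    apply List.map_congr_left
    intro j hj
    simp only [Function.comp_apply, gN]
    rw [show (1:Int) + (j:Int) = ((j + 1 : Nat) : Int) by push_cast; ring]

-- ===== VERDICT (by name: the statement is the Claim_ definition above) =====
theorem solution_spec : Claim_equal_solution := by
  intro n _
  unfold Spec_solution
  rw [solution_eq_dragon, solution_alt_eq_BL, dragon_eq_BL]
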